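-- pv_equiv track=rewrite | github.com/Favo02/leetcode | solved/85.MaximalRectangle.py | calc_intervals
-- ===== SOURCE A (Python) =====
-- def calc_intervals(cols):
--   intervals = []
--   for c in cols:
--     start = -1
--     cur_inter = []
--     for i, elem in enumerate(c):
--       if elem and start == -1:
--         start = i
--       elif not elem and start != -1:
--         cur_inter.append((start, i))
--         start = -1
--     if start != -1:
--       cur_inter.append((start, i+1))
--     intervals.append(cur_inter)
--   return intervals
-- ===== SOURCE B (Python) =====
-- def calc_intervals(cols):
--   res = []
--   for c in cols:
--     cur = []
--     idx = 0
--     rest = c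
--     while rest:
--       k = bool(rest[0])
--       n = 1
--       while n < len(rest) and bool(rest[n]) == k:
--         n += 1
--       if k:
--         cur.append((idx, idx + n))
--       idx += n
--       rest = rest[n:]
--     res.append(cur)
--   return res
-- ===== Notes on version B (the rewrite author's own statement) =====
-- stated objective: alternative
-- what changed: Replaced the start==-1 sentinel state machine over enumerate with a run-consuming scan: each maximal run of equal truthiness is measured and consumed at once, emitting (idx, idx+n) for truthy runs.
import Mathlib
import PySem

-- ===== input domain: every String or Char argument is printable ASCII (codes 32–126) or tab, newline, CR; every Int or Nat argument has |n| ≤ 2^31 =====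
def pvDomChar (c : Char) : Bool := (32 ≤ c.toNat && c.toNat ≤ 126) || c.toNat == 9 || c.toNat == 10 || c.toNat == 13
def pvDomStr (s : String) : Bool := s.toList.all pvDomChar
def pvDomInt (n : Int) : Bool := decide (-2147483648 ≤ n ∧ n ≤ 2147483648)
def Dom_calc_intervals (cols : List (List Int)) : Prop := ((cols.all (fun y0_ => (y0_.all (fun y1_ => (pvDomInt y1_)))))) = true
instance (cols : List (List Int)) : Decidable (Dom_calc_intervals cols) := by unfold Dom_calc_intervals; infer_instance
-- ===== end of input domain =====

-- B replaces A's start==-1 sentinel state machine with a run-consuming scan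
-- (each maximal run of equal truthiness consumed at once); alternative decomposition, same cost.


-- ===== PORT A =====
-- A's inner loop state: (start, cur_inter, last index i); step follows A's branch order.
def pvStepA (st : Int × List (Int × Int) × Int) (p : Int × Int) : Int × List (Int × Int) × Int :=
  if p.2 ≠ 0 ∧ st.1 = -1 then (p.1, st.2.1, p.1)
  else if p.2 = 0 ∧ st.1 ≠ -1 then (-1, st.2.1 ++ [(st.1, p.1)], p.1)
  else (st.1, st.2.1, p.1)

def pvColA (c : List Int) : List (Int × Int) :=
  let s := (PySem.List.enumerate c 0).foldl pvStepA (-1, [], 0)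
  if s.1 ≠ -1 then s.2.1 ++ [(s.1, s.2.2 + 1)] else s.2.1

def calc_intervals (cols : List (List Int)) : List (List (Int × Int)) :=
  cols.map pvColA

-- ===== PORT B =====
-- B's scan: measure the maximal run of equal truthiness at the head, consume it whole.
def pvColB : List Int → Int → List (Int × Int)
  | [], _ => []
  | x :: xs, idx =>
      let r := xs.takeWhile (fun y => decide (y ≠ 0) == decide (x ≠ 0))
      let n : Int := (r.length : Int) + 1
      let tail := pvColB (xs.drop r.length) (idx + n)
      if x ≠ 0 then (idx, idx + n) :: tail else tail
termination_by c _ => c.length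
decreasing_by
  simp only [List.length_cons, List.length_drop]
  omega

def calc_intervals_alt (cols : List (List Int)) : List (List (Int × Int)) :=
  cols.map (fun c => pvColB c 0)

-- ===== PRECONDITION & SPEC =====
def Spec_calc_intervals (cols : List (List Int)) (out : List (List (Int × Int))) : Prop := out = calc_intervals_alt cols
instance (cols : List (List Int)) (out : List (List (Int × Int))) : Decidable (Spec_calc_intervals cols out) := by unfold Spec_calc_intervals; infer_instance

-- ===== CLAIM (what is proved, stated in full; the proofs are below) =====
def Claim_equal_calc_intervals : Prop := ∀ (cols : List (List Int)), Dom_calc_intervals cols → Spec_calc_intervals cols (calc_intervals cols)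

-- ===== LEMMAS AND PROOFS =====

def pvFinish (s : Int × List (Int × Int) × Int) : List (Int × Int) :=
  if s.1 ≠ -1 then s.2.1 ++ [(s.1, s.2.2 + 1)] else s.2.1

-- skipping one falsy element is absorbed by B's run consumption
theorem pvColB_skip_falsy (x : Int) (hx : x = 0) (xs : List Int) (j : Int) :
    pvColB (x :: xs) j = pvColB xs (j + 1) := by
  subst hx
  cases xs with
  | nil => simp [pvColB]
  | cons y ys =>
    by_cases hy : y = 0
    · subst hy
      simp only [pvColB, List.takeWhile, decide_not]
      norm_num
      congr 1
      ring
    · simp [pvColB, List.takeWhile, hy]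

-- unfolding B's scan at a truthy head
theorem pvColB_cons_true (x : Int) (hx : x ≠ 0) (xs : List Int) (j : Int) :
    pvColB (x :: xs) j =
      (j, j + (((xs.takeWhile (fun y => decide (y ≠ 0))).length : Int) + 1)) ::
        pvColB (xs.drop (xs.takeWhile (fun y => decide (y ≠ 0))).length)
               (j + (((xs.takeWhile (fun y => decide (y ≠ 0))).length : Int) + 1)) := by
  simp [pvColB, hx]

-- combined OFF/ON invariant for A's fold vs B's scan
theorem pvInvariant (c : List Int) :
    (∀ (j : Int) (cur : List (Int × Int)) (i0 : Int), 0 ≤ j →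
      pvFinish ((PySem.List.enumerate c j).foldl pvStepA (-1, cur, i0)) = cur ++ pvColB c j)
    ∧
    (∀ (j st : Int) (cur : List (Int × Int)), 0 ≤ j → st ≠ -1 →
      pvFinish ((PySem.List.enumerate c j).foldl pvStepA (st, cur, j - 1)) =
        cur ++ (st, j + ((c.takeWhile (fun y => decide (y ≠ 0))).length : Int)) ::
          pvColB (c.drop (c.takeWhile (fun y => decide (y ≠ 0))).length)
                 (j + ((c.takeWhile (fun y => decide (y ≠ 0))).length : Int))) := by
  induction c with
  | nil =>
    refine ⟨fun j cur i0 _ => ?_, fun j st cur hj hst => ?_⟩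
    · simp [PySem.List.enumerate_nil, pvFinish, pvColB]
    · simp only [PySem.List.enumerate_nil, List.foldl_nil, pvFinish, pvColB,
        List.takeWhile_nil, List.length_nil, List.drop_nil]
      simp [hst]
  | cons x xs ih =>
    obtain ⟨ihOff, ihOn⟩ := ih
    refine ⟨fun j cur i0 hj => ?_, fun j st cur hj hst => ?_⟩
    · rw [PySem.List.enumerate_cons, List.foldl_cons]
      by_cases hx : x = 0
      · have hstep : pvStepA (-1, cur, i0) (j, x) = (-1, cur, j) := by
          simp [pvStepA, hx]
        rw [hstep, ihOff (j + 1) cur j (by omega), pvColB_skip_falsy x hx xs j]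
      · have hstep : pvStepA (-1, cur, i0) (j, x) = (j, cur, j) := by
          simp [pvStepA, hx]
        rw [hstep]
        have h := ihOn (j + 1) j cur (by omega) (by omega)
        have e : (j : Int) + 1 - 1 = j := by ring
        rw [e] at h
        have e2 : (j : Int) + 1 + ((xs.takeWhile (fun y => decide (y ≠ 0))).length : Int)
            = j + (((xs.takeWhile (fun y => decide (y ≠ 0))).length : Int) + 1) := by ring
        rw [e2] at h
        rw [h, pvColB_cons_true x hx xs j]
    · rw [PySem.List.enumerate_cons, List.foldl_cons]
      by_cases hx : x = 0
      · have hstep : pvStepA (st, cur, j - 1) (j, x) = (-1, cur ++ [(st, j)], j) := by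
          simp [pvStepA, hx, hst]
        rw [hstep, ihOff (j + 1) (cur ++ [(st, j)]) j (by omega)]
        rw [List.takeWhile_cons_of_neg (by simp [hx])]
        simp [pvColB_skip_falsy x hx xs j]
      · have hstep : pvStepA (st, cur, j - 1) (j, x) = (st, cur, j) := by
          simp [pvStepA, hx, hst]
        rw [hstep]
        have h := ihOn (j + 1) st cur (by omega) hst
        have e : (j : Int) + 1 - 1 = j := by ring
        rw [e] at h
        rw [h]
        have ht : List.takeWhile (fun y => decide (y ≠ 0)) (x :: xs)
            = x :: List.takeWhile (fun y => decide (y ≠ 0)) xs :=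
          List.takeWhile_cons_of_pos (by simp [hx])
        rw [ht]
        simp only [List.length_cons, List.drop_succ_cons, Nat.cast_add, Nat.cast_one]
        have e2 : (j : Int) + 1 + ((xs.takeWhile (fun y => decide (y ≠ 0))).length : Int)
            = j + (((xs.takeWhile (fun y => decide (y ≠ 0))).length : Int) + 1) := by ring
        rw [e2]

theorem pvColA_eq (c : List Int) : pvColA c = pvColB c 0 := by
  have h := (pvInvariant c).1 0 [] 0 le_rfl
  simpa [pvColA, pvFinish] using h

-- ===== VERDICT (by name: the statement is the Claim_ definition above) =====
theorem calc_intervals_spec : Claim_equal_calc_intervals := by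
  intro cols _
  unfold Spec_calc_intervals calc_intervals calc_intervals_alt
  exact List.map_congr_left (fun c _ => pvColA_eq c)
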